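-- pv_equiv track=rewrite | github.com/KunalManna/input--a3z2b4__output--aaabbbbzz | p--aaabbbbzz.py | convertNumToString
-- ===== SOURCE A (Python) =====
-- def convertNumToString(s):
--     l=[]
--     output=''
--     for ch in s:
--         if ch.isalpha():
--             l.append(ch)
--             x=ch
--         else:
--             d=int(ch)
--             output=output+x*d
--     k=sorted(output)
--     p=''.join(k)
--     return p
-- ===== SOURCE B (Python) =====
-- def convertNumToString(s):
--     # tally repeat totals per letter in one pass,
--     # then sort only the distinct letters and emit each block
--     counts = {}
--     last = ''
--     for ch in s:
--         if ch.isalpha():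
--             last = ch
--         else:
--             counts[last] = counts.get(last, 0) + int(ch)
--     return ''.join(ch * n for ch, n in sorted(counts.items(), key=lambda kv: kv[0]))
-- ===== Notes on version B (the rewrite author's own statement) =====
-- stated objective: alternative
-- what changed: Instead of materialising every repeated letter into one big string and calling sorted() on all of it, B tallies per-letter repeat totals in a dict in one pass, sorts only the distinct letters, and emits each letter's block (counting sort).
import Mathlib
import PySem

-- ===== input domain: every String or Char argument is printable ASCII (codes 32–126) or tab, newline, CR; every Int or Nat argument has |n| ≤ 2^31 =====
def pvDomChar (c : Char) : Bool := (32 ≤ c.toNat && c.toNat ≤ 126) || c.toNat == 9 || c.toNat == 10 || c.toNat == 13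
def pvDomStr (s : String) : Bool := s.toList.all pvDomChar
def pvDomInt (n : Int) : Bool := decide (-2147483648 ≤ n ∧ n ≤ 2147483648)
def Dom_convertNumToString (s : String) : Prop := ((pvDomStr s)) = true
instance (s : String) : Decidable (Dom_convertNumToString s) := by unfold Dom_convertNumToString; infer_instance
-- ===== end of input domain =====

-- B replaces A's build-then-sort (materialise all repeated characters, then sorted(...)) by a
-- counting sort: per-letter repeat totals tallied in a dict in one pass, then only the distinct
-- letters are sorted and each block is emitted.

-- ===== PORT A =====
-- state (l, output, x); x : Option Char models Python's possibly-unbound variable x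
-- (none = unbound; using it raises NameError = result none, excluded by Pre_).
def convertAuxA : List Char → List Char → List Char → Option Char →
    Option (List Char × List Char × Option Char)
  | [], l, output, x => some (l, output, x)
  | ch :: rest, l, output, x =>
    if PySem.Chars.isalpha ch then
      convertAuxA rest (l ++ [ch]) output (some ch)
    else
      match PySem.Int.ofChars? [ch], x with   -- d = int(ch); none = ValueError
      | some d, some xc => convertAuxA rest l (output ++ PySem.List.pyRepeat [xc] d) x
      | _, _ => none

def convertNumToString (s : String) : String :=
  match convertAuxA s.toList [] [] none with
  | some (_, output, _) => String.ofList (PySem.List.sorted output (fun c => c) false)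
  | none => ""   -- Python raises here; excluded by Pre_

-- ===== PORT B =====
-- counts : dict keyed by the Python string `last` (List Char; [] = the initial '').
def convertAuxB : List Char → PySem.Dict (List Char) Int → List Char →
    Option (PySem.Dict (List Char) Int)
  | [], counts, _ => some counts
  | ch :: rest, counts, last =>
    if PySem.Chars.isalpha ch then
      convertAuxB rest counts [ch]
    else
      match PySem.Int.ofChars? [ch] with   -- int(ch); none = ValueError
      | some n => convertAuxB rest (counts.insert last (counts.getD last 0 + n)) last
      | none => none

-- ''.join(ch * n for ch, n in sorted(counts.items(), key=lambda kv: kv[0]))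
def convertEmitB (counts : PySem.Dict (List Char) Int) : List Char :=
  PySem.Chars.join []
    ((PySem.List.sorted counts.items (fun p => p.1) false).map
      (fun p => PySem.List.pyRepeat p.1 p.2))

def convertNumToString_alt (s : String) : String :=
  match convertAuxB s.toList PySem.Dict.empty [] with
  | some counts => String.ofList (convertEmitB counts)
  | none => ""   -- Python raises here; excluded by Pre_

-- ===== PRECONDITION & SPEC =====
-- Pre_: exactly where A returns without raising: every character is a letter or a digit (else
-- int(ch) raises ValueError) and a nonempty string starts with a letter (else x is unbound:
-- NameError). No input on which A returns a value is excluded.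
def Pre_convertNumToString (s : String) : Prop :=
  s.toList.all (fun c => PySem.Chars.isalpha c || PySem.Chars.isdigit c) = true ∧
  s.toList.head?.map PySem.Chars.isalpha ≠ some false
instance (s : String) : Decidable (Pre_convertNumToString s) := by
  unfold Pre_convertNumToString; infer_instance

def pvWitness_convertNumToString : String := "a3b2"

def Spec_convertNumToString (s : String) (out : String) : Prop := out = convertNumToString_alt s
instance (s : String) (out : String) : Decidable (Spec_convertNumToString s out) := by
  unfold Spec_convertNumToString; infer_instance

-- ===== CLAIM (what is proved, stated in full; the proofs are below) =====
def Claim_equal_convertNumToString : Prop :=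
  ∀ (s : String), Dom_convertNumToString s → Pre_convertNumToString s →
    Spec_convertNumToString s (convertNumToString s)

-- ===== LEMMAS AND PROOFS =====

theorem charLe (a b : Char) : a ≤ b ↔ a.toNat ≤ b.toNat :=
  Char.le_def.trans UInt32.le_iff_toNat_le

theorem digitBounds (c : Char) (h : PySem.Chars.isdigit c = true) :
    48 ≤ c.toNat ∧ c.toNat ≤ 57 := by
  simp only [PySem.Chars.isdigit, Bool.and_eq_true, decide_eq_true_eq, charLe] at h
  exact h

theorem digitNotAlpha (c : Char) (h : PySem.Chars.isdigit c = true) :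
    PySem.Chars.isalpha c = false := by
  have hb := digitBounds c h
  simp only [PySem.Chars.isalpha, PySem.Chars.isupper, PySem.Chars.islower,
    Bool.or_eq_false_iff, Bool.and_eq_false_iff, decide_eq_false_iff_not, charLe]
  have h1 : ('A' : Char).toNat = 65 := rfl
  have h2 : ('Z' : Char).toNat = 90 := rfl
  have h3 : ('a' : Char).toNat = 97 := rfl
  have h4 : ('z' : Char).toNat = 122 := rfl
  omega

theorem ofNat_toNat_char (c : Char) : Char.ofNat c.toNat = c := Char.ofNat_toNat c

theorem ofChars_digit : ∀ n, n < 128 → PySem.Chars.isdigit (Char.ofNat n) = true →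
    PySem.Int.ofChars? [Char.ofNat n] = some ((n : Int) - 48) := by decide

theorem domChar_lt (c : Char) (h : pvDomChar c = true) : c.toNat < 128 := by
  simp only [pvDomChar, Bool.or_eq_true, Bool.and_eq_true, decide_eq_true_eq,
    Nat.le_iff_lt_or_eq, beq_iff_eq] at h
  omega

-- the loop invariant: after an initial letter, A's expanded output and B's tally dict
-- describe the same multiset of characters, the dict's keys are distinct singleton strings
theorem loop_inv : ∀ (cs l output : List Char) (xc : Char)
    (counts : PySem.Dict (List Char) Int),
    (∀ c ∈ cs, pvDomChar c = true) →
    (∀ c ∈ cs, PySem.Chars.isalpha c = true ∨ PySem.Chars.isdigit c = true) →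
    (∀ c : Char, counts.getD [c] 0 = (output.count c : Int)) →
    counts.keys.Nodup →
    (∀ k ∈ counts.keys, ∃ c : Char, k = [c]) →
    ∃ l' output' x' counts',
      convertAuxA cs l output (some xc) = some (l', output', x') ∧
      convertAuxB cs counts [xc] = some counts' ∧
      (∀ c : Char, counts'.getD [c] 0 = (output'.count c : Int)) ∧
      counts'.keys.Nodup ∧
      (∀ k ∈ counts'.keys, ∃ c : Char, k = [c]) := by
  intro cs
  induction cs with
  | nil =>
    intro l output xc counts _ _ hcnt hnd hsing
    exact ⟨l, output, some xc, counts, rfl, rfl, hcnt, hnd, hsing⟩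
  | cons ch rest ih =>
    intro l output xc counts hdom halnum hcnt hnd hsing
    have hchdom : ch.toNat < 128 := domChar_lt ch (hdom ch (by simp))
    rcases halnum ch (by simp) with ha | hd
    · -- letter: x := ch, last := [ch], counts and output unchanged
      simp only [convertAuxA, convertAuxB, ha, if_true]
      exact ih (l ++ [ch]) output ch counts (fun c hc => hdom c (by simp [hc]))
        (fun c hc => halnum c (by simp [hc])) hcnt hnd hsing
    · -- digit: output grows by d copies of xc; counts[[xc]] grows by d
      have hna : PySem.Chars.isalpha ch = false := digitNotAlpha ch hd
      have hb := digitBounds ch hd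
      have hval : PySem.Int.ofChars? [ch] = some ((ch.toNat : Int) - 48) := by
        have := ofChars_digit ch.toNat hchdom (by rw [ofNat_toNat_char]; exact hd)
        rwa [ofNat_toNat_char] at this
      simp only [convertAuxA, convertAuxB, hna, hval]
      set d : Int := (ch.toNat : Int) - 48 with hdval
      have hd0 : 0 ≤ d := by omega
      apply ih l (output ++ PySem.List.pyRepeat [xc] d) xc
        (counts.insert [xc] (counts.getD [xc] 0 + d))
        (fun c hc => hdom c (by simp [hc])) (fun c hc => halnum c (by simp [hc]))
      · intro c
        simp only [PySem.Dict.getD_insert, List.count_append, PySem.List.pyRepeat_singleton,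
          List.count_replicate, beq_iff_eq, List.cons.injEq, and_true]
        by_cases hcx : c = xc
        · subst hcx
          simp only [if_true]
          rw [hcnt c]
          push_cast [Int.toNat_of_nonneg hd0]
          ring
        · have h1 : ¬ (xc = c) := fun h => hcx h.symm
          simp only [hcx, h1, if_false]
          rw [hcnt c]
          simp
      · exact PySem.Dict.nodup_keys_insert counts [xc] _ hnd
      · intro k hk
        simp only [PySem.Dict.keys, List.mem_map] at hk
        obtain ⟨p, hp, hpk⟩ := hk
        rcases (PySem.Dict.mem_items_insert counts [xc] _ p).1 hp with h | ⟨h, _⟩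
        · exact ⟨xc, by rw [← hpk, h]⟩
        · exact hsing k (by
            simp only [PySem.Dict.keys, List.mem_map]; exact ⟨p, h, hpk⟩)

-- ''.join with an empty separator concatenates the pieces
theorem join_nil_flatten (ps : List (List Char)) : PySem.Chars.join [] ps = ps.flatten := by
  induction ps with
  | nil => rfl
  | cons p ps ih =>
    cases ps with
    | nil => simp [PySem.Chars.join, List.intercalate]
    | cons q qs =>
      rw [PySem.Chars.join_cons_cons ([] : List Char) p q qs]
      simp only [List.flatten_cons, List.append_nil]
      rw [ih]
      simp

-- lex order on singleton strings is the character order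
theorem singleton_lt (c d : Char) (h : ([c] : List Char) < [d]) : c < d := by
  rcases List.cons_lt_cons_iff.mp h with h | ⟨_, h⟩
  · exact h
  · exact absurd h (List.lt_irrefl _)

-- a strictly key-increasing block list flattens to a sorted character list
theorem blocks_sorted : ∀ ps : List (List Char × Int),
    (∀ p ∈ ps, ∃ c : Char, p.1 = [c]) →
    ps.Pairwise (fun p q => p.1 < q.1) →
    (ps.map (fun p => PySem.List.pyRepeat p.1 p.2)).flatten.Pairwise (· ≤ ·) ∧
    ∀ a ∈ (ps.map (fun p => PySem.List.pyRepeat p.1 p.2)).flatten, ∃ p ∈ ps, p.1 = [a] := by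
  intro ps
  induction ps with
  | nil => simp
  | cons p ps ih =>
    intro hsing hpw
    obtain ⟨c, hc⟩ := hsing p (by simp)
    obtain ⟨hhead, hpw'⟩ := List.pairwise_cons.1 hpw
    obtain ⟨ihpw, ihmem⟩ := ih (fun q hq => hsing q (by simp [hq])) hpw'
    simp only [List.map_cons, List.flatten_cons]
    constructor
    · rw [List.pairwise_append]
      refine ⟨?_, ihpw, ?_⟩
      · rw [hc, PySem.List.pyRepeat_singleton]
        exact List.pairwise_replicate.2 (Or.inr le_rfl)
      · intro a ha b hb
        rw [hc, PySem.List.pyRepeat_singleton] at ha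
        obtain ⟨q, hq, hqb⟩ := ihmem b hb
        have : p.1 < q.1 := hhead q hq
        rw [hc, hqb] at this
        rw [List.eq_of_mem_replicate ha]
        exact le_of_lt (singleton_lt c b this)
    · intro a ha
      rcases List.mem_append.1 ha with h | h
      · rw [hc, PySem.List.pyRepeat_singleton] at h
        exact ⟨p, by simp, by rw [hc, List.eq_of_mem_replicate h]⟩
      · obtain ⟨q, hq, hqa⟩ := ihmem a h
        exact ⟨q, by simp [hq], hqa⟩

-- character count of the flattened blocks as a sum over the items
theorem blocks_count (a : Char) : ∀ ps : List (List Char × Int),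
    (∀ p ∈ ps, ∃ c : Char, p.1 = [c]) →
    ((ps.map (fun p => PySem.List.pyRepeat p.1 p.2)).flatten).count a
      = (ps.map (fun p => if p.1 = [a] then p.2.toNat else 0)).sum := by
  intro ps
  induction ps with
  | nil => simp
  | cons p ps ih =>
    intro hsing
    obtain ⟨c, hc⟩ := hsing p (by simp)
    simp only [List.map_cons, List.flatten_cons, List.count_append, List.sum_cons]
    rw [ih (fun q hq => hsing q (by simp [hq])), hc, PySem.List.pyRepeat_singleton,
      List.count_replicate]
    congr 1
    by_cases hca : c = a
    · subst hca; simp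
    · have : ¬ ([c] : List Char) = [a] := by simp [hca]
      simp [hca, this]

-- the if-sum over a nodup-key pair list picks out the one matching value …
theorem sum_ite_of_mem : ∀ (l : List (List Char × Int)) (k : List Char) (v : Int),
    (l.map Prod.fst).Nodup → (k, v) ∈ l →
    (l.map (fun p => if p.1 = k then p.2.toNat else 0)).sum = v.toNat := by
  intro l
  induction l with
  | nil => intro k v _ h; simp at h
  | cons p l ih =>
    intro k v hnd hm
    simp only [List.map_cons, List.nodup_cons, List.mem_map] at hnd
    obtain ⟨hnp, hnd'⟩ := hnd
    simp only [List.map_cons, List.sum_cons]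
    rcases List.mem_cons.1 hm with h | h
    · subst h
      have hz : (l.map (fun p => if p.1 = k then p.2.toNat else 0)).sum = 0 := by
        apply List.sum_eq_zero
        intro x hx
        obtain ⟨q, hq, hqx⟩ := List.mem_map.1 hx
        have hqk : q.1 ≠ k := by
          intro he
          exact hnp ⟨q, hq, he⟩
        simp [hqk] at hqx
        omega
      simp [hz]
    · have hpk : p.1 ≠ k := by
        intro he
        exact hnp ⟨(k, v), h, he.symm⟩
      rw [if_neg hpk, ih k v hnd' h]
      simp

-- … and is zero when the key is absent
theorem sum_ite_of_not_mem : ∀ (l : List (List Char × Int)) (k : List Char),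
    k ∉ l.map Prod.fst →
    (l.map (fun p => if p.1 = k then p.2.toNat else 0)).sum = 0 := by
  intro l
  induction l with
  | nil => intro _ _; rfl
  | cons p l ih =>
    intro k hk
    simp only [List.map_cons, List.mem_cons, not_or] at hk
    simp only [List.map_cons, List.sum_cons]
    rw [if_neg (fun h : p.1 = k => hk.1 h.symm), ih k hk.2]

-- the default lex LT/decidability on List Char and the LinearOrder-derived ones sort identically
theorem sorted_inst_bridge (xs : List (List Char × Int)) :
    (@PySem.List.sorted (List Char × Int) (List Char) List.instLT
        (fun a b => a.decidableLT b) xs (fun p => p.1) false)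
  = (@PySem.List.sorted (List Char × Int) (List Char) List.instLinearOrder.toLT
        LinearOrder.toDecidableLT xs (fun p => p.1) false) := by
  congr 1

-- final step: sorted(output) is exactly B's emission from the tally dict
theorem emit_eq_sorted (counts : PySem.Dict (List Char) Int) (output : List Char)
    (hcnt : ∀ c : Char, counts.getD [c] 0 = (output.count c : Int))
    (hnd : counts.keys.Nodup)
    (hsing : ∀ k ∈ counts.keys, ∃ c : Char, k = [c]) :
    PySem.List.sorted output (fun c => c) false = convertEmitB counts := by
  have hkeys : counts.keys = counts.items.map Prod.fst := rfl
  set si := @PySem.List.sorted (List Char × Int) (List Char) List.instLinearOrder.toLT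
      LinearOrder.toDecidableLT counts.items (fun p => p.1) false with hsi
  have hperm : si.Perm counts.items :=
    @PySem.List.sorted_perm (List Char × Int) (List Char) List.instLinearOrder.toLT
      LinearOrder.toDecidableLT counts.items (fun p => p.1) false
  have hndsi : (si.map Prod.fst).Nodup := by
    rw [List.Perm.nodup_iff (hperm.map Prod.fst)]
    rw [hkeys] at hnd; exact hnd
  have hsingsi : ∀ p ∈ si, ∃ c : Char, p.1 = [c] := by
    intro p hp
    exact hsing p.1 (by rw [hkeys]; exact List.mem_map.2 ⟨p, hperm.mem_iff.1 hp, rfl⟩)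
  have hpwlt : si.Pairwise (fun p q => p.1 < q.1) := by
    have hle : si.Pairwise (fun p q => p.1 ≤ q.1) := by
      rw [hsi]; exact PySem.List.sorted_pairwise counts.items (fun p => p.1)
    have hne : si.Pairwise (fun p q => p.1 ≠ q.1) := List.pairwise_map.1 hndsi
    exact (hle.and hne).imp (fun h => lt_of_le_of_ne h.1 h.2)
  obtain ⟨hflpw, _⟩ := blocks_sorted si hsingsi hpwlt
  have hcount : ∀ a : Char,
      ((si.map (fun p => PySem.List.pyRepeat p.1 p.2)).flatten).count a = output.count a := by
    intro a
    rw [blocks_count a si hsingsi]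
    have hsum : (si.map (fun p => if p.1 = [a] then p.2.toNat else 0)).sum
        = (counts.items.map (fun p => if p.1 = [a] then p.2.toNat else 0)).sum :=
      (hperm.map (fun p => if p.1 = [a] then p.2.toNat else 0)).sum_eq
    rw [hsum]
    cases hg : counts.get? [a] with
    | some v =>
      have hmem : ([a], v) ∈ counts.items := PySem.Dict.mem_items_of_get?_eq_some counts hg
      rw [sum_ite_of_mem counts.items [a] v (hkeys ▸ hnd) hmem]
      have hgd := PySem.Dict.getD_of_mem_items counts hmem hnd 0
      have hca := hcnt a
      rw [hgd] at hca
      omega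
    | none =>
      have hnk : [a] ∉ counts.items.map Prod.fst := by
        rw [← hkeys]
        exact (PySem.Dict.get?_eq_none_iff_not_mem_keys counts [a]).1 hg
      rw [sum_ite_of_not_mem counts.items [a] hnk]
      have hgd : counts.getD [a] 0 = 0 := by
        simp [PySem.Dict.getD, hg]
      have hca := hcnt a
      rw [hgd] at hca
      omega
  unfold convertEmitB
  rw [join_nil_flatten, sorted_inst_bridge, ← hsi]
  apply PySem.List.sorted_id_eq_of_perm_of_pairwise
  · rw [List.perm_iff_count]
    intro a
    exact hcount a
  · exact hflpw

-- ===== VERDICT (by name: the statement is the Claim_ definition above) =====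
set_option maxRecDepth 8192 in
theorem convertNumToString_spec : Claim_equal_convertNumToString := by
  intro s hdom hpre
  unfold Spec_convertNumToString
  obtain ⟨halnum0, hhead0⟩ := hpre
  have halnum : ∀ c ∈ s.toList, PySem.Chars.isalpha c = true ∨ PySem.Chars.isdigit c = true := by
    intro c hc
    have h := List.all_eq_true.1 halnum0 c hc
    rcases (Bool.or_eq_true _ _).mp h with h | h
    · exact Or.inl h
    · exact Or.inr h
  have hhead : ∀ c, s.toList.head? = some c → PySem.Chars.isalpha c = true := by
    intro c hc
    rw [hc, Option.map_some] at hhead0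
    cases hb : PySem.Chars.isalpha c
    · exact absurd (by rw [hb]) hhead0
    · rfl
  have hdomc : ∀ c ∈ s.toList, pvDomChar c = true := by
    intro c hc
    have := hdom
    unfold Dom_convertNumToString pvDomStr at this
    exact List.all_eq_true.1 this c hc
  unfold convertNumToString convertNumToString_alt
  cases hs : s.toList with
  | nil =>
    show String.ofList (PySem.List.sorted [] (fun c => c) false) =
      String.ofList (convertEmitB PySem.Dict.empty)
    exact congrArg String.ofList
      (emit_eq_sorted PySem.Dict.empty []
        (by intro c; simp [PySem.Dict.getD_empty])
        (by simp [PySem.Dict.keys, PySem.Dict.empty])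
        (by intro k hk; simp [PySem.Dict.keys, PySem.Dict.empty] at hk))
  | cons hd tl =>
    have hha : PySem.Chars.isalpha hd = true := hhead hd (by rw [hs]; rfl)
    obtain ⟨l', output', x', counts', hA, hB, hcnt', hnd', hsing'⟩ :=
      loop_inv tl [hd] [] hd PySem.Dict.empty
        (fun c hc => hdomc c (by rw [hs]; simp [hc]))
        (fun c hc => halnum c (by rw [hs]; simp [hc]))
        (by intro c; simp [PySem.Dict.getD_empty])
        (by simp [PySem.Dict.keys, PySem.Dict.empty])
        (by intro k hk; simp [PySem.Dict.keys, PySem.Dict.empty] at hk)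
    simp only [convertAuxA, convertAuxB, hha, if_true, List.nil_append, hA, hB]
    exact congrArg String.ofList (emit_eq_sorted counts' output' hcnt' hnd' hsing')
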